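-- pv_equiv track=rewrite | github.com/ameerarsath/publicdocsafe | backend/app/middleware/security_middleware.py | _is_suspicious_path
-- ===== SOURCE A (Python) =====
-- def _is_suspicious_path(path: str) -> bool:
--     """Check if path matches suspicious patterns."""
--     suspicious_patterns = [
--         ".env", "config", "admin", "phpinfo", "wp-admin", "wp-content",
--         "backup", "database", "sql", "dump", ".git", ".svn",
--         "shell", "cmd", "exec", "eval", "system"
--     ]
--
--     path_lower = path.lower()
--     return any(pattern in path_lower for pattern in suspicious_patterns)
-- ===== SOURCE B (Python) =====
-- def _is_suspicious_path(path: str) -> bool: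
--     """Check if path matches suspicious patterns (single left-to-right scan)."""
--     suspicious_patterns = [
--         ".env", "config", "admin", "phpinfo", "wp-admin", "wp-content",
--         "backup", "database", "sql", "dump", ".git", ".svn",
--         "shell", "cmd", "exec", "eval", "system"
--     ]
--
--     p = path.lower()
--     for i in range(len(p)):
--         if any(p.startswith(pat, i) for pat in suspicious_patterns):
--             return True
--     return False
-- ===== Notes on version B (the rewrite author's own statement) =====
-- stated objective: alternative
-- what changed: A iterates pattern-major, running a full substring search of the path for each pattern; B makes one left-to-right pass over the path and at each position checks whether any pattern starts there (position-major multi-pattern scan with early exit).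
import Mathlib
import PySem

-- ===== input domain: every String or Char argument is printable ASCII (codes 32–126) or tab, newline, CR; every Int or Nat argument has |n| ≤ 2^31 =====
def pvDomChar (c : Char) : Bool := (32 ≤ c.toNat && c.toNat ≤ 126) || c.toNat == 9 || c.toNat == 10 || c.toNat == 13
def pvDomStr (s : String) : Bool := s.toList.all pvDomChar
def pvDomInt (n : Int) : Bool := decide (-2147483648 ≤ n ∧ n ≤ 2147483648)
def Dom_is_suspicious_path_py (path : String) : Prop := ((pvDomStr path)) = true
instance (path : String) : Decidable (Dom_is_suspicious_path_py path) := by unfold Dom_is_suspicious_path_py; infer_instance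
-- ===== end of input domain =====

-- B replaces A's pattern-major loop (one full substring search per pattern) by one
-- left-to-right pass over the path testing at each position whether any pattern starts there.

-- ===== PORT A =====
def pvPatterns : List String :=
  [".env", "config", "admin", "phpinfo", "wp-admin", "wp-content",
   "backup", "database", "sql", "dump", ".git", ".svn",
   "shell", "cmd", "exec", "eval", "system"]

def is_suspicious_path_py (path : String) : Bool :=
  let path_lower := PySem.Str.lower path
  pvPatterns.any (fun pattern => PySem.Str.isIn pattern path_lower)

-- ===== PORT B =====
-- the scan loop: at each position (suffix), check whether any pattern starts there
def pvScan (pats : List (List Char)) : List Char → Bool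
  | [] => false
  | c :: t =>
    if pats.any (fun pat => PySem.Chars.startswith (c :: t) pat) then true
    else pvScan pats t

def is_suspicious_path_py_alt (path : String) : Bool :=
  pvScan (pvPatterns.map String.toList) (PySem.Str.lower path).toList

-- ===== PRECONDITION & SPEC =====
def Spec_is_suspicious_path_py (path : String) (out : Bool) : Prop := out = is_suspicious_path_py_alt path
instance (path : String) (out : Bool) : Decidable (Spec_is_suspicious_path_py path out) := by unfold Spec_is_suspicious_path_py; infer_instance

-- ===== CLAIM (what is proved, stated in full; the proofs are below) =====
def Claim_equal_is_suspicious_path_py : Prop := ∀ (path : String), Dom_is_suspicious_path_py path → Spec_is_suspicious_path_py path (is_suspicious_path_py path)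

-- ===== LEMMAS AND PROOFS =====
theorem pvScan_iff (pats : List (List Char)) (hne : ∀ p ∈ pats, p ≠ []) :
    ∀ s : List Char, pvScan pats s = true ↔ ∃ p ∈ pats, p <:+: s := by
  intro s
  induction s with
  | nil =>
    constructor
    · intro h
      rw [show pvScan pats [] = false from rfl] at h
      exact Bool.noConfusion h
    · rintro ⟨p, hp, hinf⟩
      exact absurd (List.eq_nil_of_infix_nil hinf) (hne p hp)
  | cons c t ih =>
    rw [show pvScan pats (c :: t)
          = (if pats.any (fun pat => PySem.Chars.startswith (c :: t) pat) then true
             else pvScan pats t) from rfl]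
    by_cases h : pats.any (fun pat => PySem.Chars.startswith (c :: t) pat) = true
    · rw [if_pos h]
      rw [List.any_eq_true] at h
      obtain ⟨p, hp, hsw⟩ := h
      exact ⟨fun _ => ⟨p, hp, ((PySem.Chars.startswith_iff _ _).mp hsw).isInfix⟩, fun _ => rfl⟩
    · rw [if_neg h, ih]
      constructor
      · rintro ⟨p, hp, hinf⟩; exact ⟨p, hp, List.infix_cons hinf⟩
      · rintro ⟨p, hp, hinf⟩
        rcases (List.infix_cons_iff).mp hinf with hpre | hinf'
        · exact absurd (List.any_eq_true.mpr ⟨p, hp, (PySem.Chars.startswith_iff _ _).mpr hpre⟩) h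
        · exact ⟨p, hp, hinf'⟩

-- ===== VERDICT (by name: the statement is the Claim_ definition above) =====
theorem is_suspicious_path_py_spec : Claim_equal_is_suspicious_path_py := by
  intro path _
  unfold Spec_is_suspicious_path_py is_suspicious_path_py is_suspicious_path_py_alt
  rw [Bool.eq_iff_iff]
  rw [pvScan_iff _ (by decide)]
  simp only [List.any_eq_true, PySem.Str.isIn_iff_infix]
  constructor
  · rintro ⟨x, hx, hinf⟩; exact ⟨x.toList, List.mem_map_of_mem hx, hinf⟩
  · rintro ⟨p, hp, hinf⟩
    obtain ⟨x, hx, rfl⟩ := List.mem_map.mp hp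
    exact ⟨x, hx, hinf⟩
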